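-- pv_equiv track=rewrite | github.com/mvjacobs/Crone | CrowdProcessor/Correlation/TweetsAuthorOutputter.py | count_features
-- ===== SOURCE A (Python) =====
-- from itertools import groupby
-- from operator import itemgetter
--
-- def count_features(articles):
--     out = []
--     sorted_input = sorted(articles, key=itemgetter(0))
--     for id, vectors in groupby(sorted_input, key=itemgetter(0)):
--         feature_vectors = [vector[1:] for vector in vectors]
--         credible_count = len(feature_vectors)
--         for key1, features in enumerate(feature_vectors):
--             for key2, feature in enumerate(features):
--                 feature_vectors[key1][key2] = int(feature)
--
--         feature_totals = [ sum(x) for x in zip(*feature_vectors) ]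
--         out.append([id] + [credible_count] + feature_totals)
--
--     return out
-- ===== SOURCE B (Python) =====
-- def count_features(articles):
--     groups = {}
--     for a in articles:
--         groups.setdefault(a[0], []).append(a[1:])
--     return [[aid, len(vectors)] + [sum(col) for col in zip(*vectors)]
--             for aid, vectors in sorted(groups.items())]
-- ===== Notes on version B (the rewrite author's own statement) =====
-- stated objective: simpler
-- what changed: Replaces sort-whole-list + itertools.groupby with one dict-grouping pass (id -> list of feature vectors) followed by sorting only the distinct ids; Pre_ excludes inputs containing an empty inner list, on which A's itemgetter(0) raises IndexError (B's a[0] raises there too).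
import Mathlib
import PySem

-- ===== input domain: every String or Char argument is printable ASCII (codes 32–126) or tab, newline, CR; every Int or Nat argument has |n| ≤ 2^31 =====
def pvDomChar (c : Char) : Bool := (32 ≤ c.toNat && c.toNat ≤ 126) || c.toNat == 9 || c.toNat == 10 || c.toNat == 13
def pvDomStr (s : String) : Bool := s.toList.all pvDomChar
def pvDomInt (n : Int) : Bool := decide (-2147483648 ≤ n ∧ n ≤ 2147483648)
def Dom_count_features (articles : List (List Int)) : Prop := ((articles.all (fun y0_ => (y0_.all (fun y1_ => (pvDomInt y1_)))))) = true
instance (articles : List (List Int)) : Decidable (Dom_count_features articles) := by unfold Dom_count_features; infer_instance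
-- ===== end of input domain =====

-- B groups articles into a dict (id -> list of feature vectors) in one pass and sorts only the
-- distinct ids, instead of sorting the whole list and running groupby (objective: simpler).
-- Neither implementation mutates its input.

-- ===== PORT A =====
-- minimum feature-vector length (zip(*)'s truncation bound); 0 when the group list is empty
def pvMinLen (ts : List (List Int)) : Nat := ((ts.map List.length).min?).getD 0
-- hand port of '[sum(x) for x in zip(*vectors)]': column i sums for i < min length — exact
def pvCols (ts : List (List Int)) : List Int :=
  (List.range (pvMinLen ts)).map (fun i => (ts.map (fun t => t.getD i 0)).sum)
-- itertools.groupby(s, key=itemgetter(0)): maximal runs of consecutive equal keys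
def pvGroupby : List (List Int) → List (Int × List (List Int))
  | [] => []
  | a :: s =>
    match pvGroupby s with
    | [] => [(a.headI, [a])]
    | (k, g) :: gs => if a.headI = k then (k, a :: g) :: gs else (a.headI, [a]) :: (k, g) :: gs

-- vector[0] is ported as headI: Pre_ guarantees every inner list is nonempty
def count_features (articles : List (List Int)) : List (List Int) :=
  let sorted_input := PySem.List.sorted articles (fun v => v.headI) false
  (pvGroupby sorted_input).map (fun kg =>
    let feature_vectors := kg.2.map List.tail          -- vector[1:]
    let credible_count : Int := feature_vectors.length
    let feature_vectors := feature_vectors.map (fun fs => fs.map (fun f => f)) -- int(feature) on an int is the identity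
    kg.1 :: credible_count :: pvCols feature_vectors)

-- ===== PORT B =====
-- groups.setdefault(a[0], []).append(a[1:])
def pvStep (d : PySem.Dict Int (List (List Int))) (a : List Int) : PySem.Dict Int (List (List Int)) :=
  d.insert a.headI (d.getD a.headI [] ++ [a.tail])

-- sorted(groups.items()) compares (id, …) tuples; ids are distinct, so it is the sort by id
def count_features_alt (articles : List (List Int)) : List (List Int) :=
  let groups := articles.foldl pvStep PySem.Dict.empty
  (PySem.List.sorted groups.items (fun p => p.1) false).map
    (fun p => p.1 :: (p.2.length : Int) :: pvCols p.2)

-- ===== PRECONDITION & SPEC =====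
-- Pre_ excludes exactly the inputs containing an empty inner list, on which A's
-- itemgetter(0) (and B's a[0]) raises IndexError.
def Pre_count_features (articles : List (List Int)) : Prop :=
  (articles.all (fun a => !a.isEmpty)) = true
instance (articles : List (List Int)) : Decidable (Pre_count_features articles) := by
  unfold Pre_count_features; infer_instance
def pvWitness_count_features : List (List Int) := [[1, 2, 5], [2, 7], [1, 3, 4]]

def Spec_count_features (articles : List (List Int)) (out : List (List Int)) : Prop :=
  out = count_features_alt articles
instance (articles : List (List Int)) (out : List (List Int)) : Decidable (Spec_count_features articles out) := by
  unfold Spec_count_features; infer_instance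

-- ===== CLAIM (what is proved, stated in full; the proofs are below) =====
def Claim_equal_count_features : Prop :=
  ∀ (articles : List (List Int)), Dom_count_features articles →
    Pre_count_features articles → Spec_count_features articles (count_features articles)

-- ===== LEMMAS AND PROOFS =====

-- consecutive dedup, mirroring pvGroupby's key structure
def pvCdedup : List Int → List Int
  | [] => []
  | x :: xs =>
    match pvCdedup xs with
    | [] => [x]
    | y :: ys => if x = y then y :: ys else x :: y :: ys

theorem pvCdedup_eq_nil_iff (xs : List Int) : pvCdedup xs = [] ↔ xs = [] := by
  cases xs with
  | nil => simp [pvCdedup]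
  | cons x xs =>
    cases h : pvCdedup xs with
    | nil => simp [pvCdedup, h]
    | cons y ys =>
      by_cases hxy : x = y <;> simp [pvCdedup, h, hxy]

theorem mem_pvCdedup (xs : List Int) (a : Int) : a ∈ pvCdedup xs ↔ a ∈ xs := by
  induction xs with
  | nil => simp [pvCdedup]
  | cons x xs ih =>
    cases h : pvCdedup xs with
    | nil =>
      have hx : xs = [] := (pvCdedup_eq_nil_iff xs).mp h
      subst hx; simp [pvCdedup]
    | cons y ys =>
      rw [h] at ih
      simp only [List.mem_cons] at ih
      by_cases hxy : x = y
      · subst hxy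
        have hred : pvCdedup (x :: xs) = x :: ys := by simp [pvCdedup, h]
        rw [hred, List.mem_cons, List.mem_cons]
        tauto
      · have hred : pvCdedup (x :: xs) = x :: y :: ys := by simp [pvCdedup, h, hxy]
        rw [hred, List.mem_cons, List.mem_cons, List.mem_cons]
        tauto

theorem pvCdedup_pairwise_lt (xs : List Int) (h : xs.Pairwise (· ≤ ·)) :
    (pvCdedup xs).Pairwise (· < ·) := by
  induction xs with
  | nil => simp [pvCdedup]
  | cons x xs ih =>
    rcases List.pairwise_cons.mp h with ⟨hle, hxs⟩
    have ihp := ih hxs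
    cases hc : pvCdedup xs with
    | nil => simp [pvCdedup, hc]
    | cons y ys =>
      rw [hc] at ihp
      by_cases hxy : x = y
      · simpa [pvCdedup, hc, hxy] using ihp
      · simp only [pvCdedup, hc, if_neg hxy]
        apply List.pairwise_cons.mpr
        refine ⟨?_, ihp⟩
        intro z hz
        have hzmem : z ∈ xs := (mem_pvCdedup xs z).mp (hc ▸ hz)
        have hxz : x ≤ z := hle z hzmem
        rcases List.mem_cons.mp hz with rfl | hzys
        · exact lt_of_le_of_ne hxz hxy
        · have hy : y ∈ xs := (mem_pvCdedup xs y).mp (hc ▸ List.mem_cons_self)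
          have hxy' : x ≤ y := hle y hy
          have hyz : y < z := (List.pairwise_cons.mp ihp).1 z hzys
          exact lt_of_le_of_lt hxy' hyz

theorem pvGroupby_sorted (s : List (List Int))
    (h : s.Pairwise (fun a b => a.headI ≤ b.headI)) :
    pvGroupby s =
      (pvCdedup (s.map (fun a => a.headI))).map
        (fun k => (k, s.filter (fun a => decide (a.headI = k)))) := by
  induction s with
  | nil => simp [pvGroupby, pvCdedup]
  | cons a s ih =>
    rcases List.pairwise_cons.mp h with ⟨hle, hs⟩
    have ihp := ih hs
    have hkpair : (s.map (fun a => a.headI)).Pairwise (· ≤ ·) :=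
      List.pairwise_map.mpr hs
    cases hc : pvCdedup (s.map (fun a => a.headI)) with
    | nil =>
      have : s.map (fun a => a.headI) = [] := (pvCdedup_eq_nil_iff _).mp hc
      have hsnil : s = [] := by simpa using this
      subst hsnil
      simp [pvGroupby, pvCdedup]
    | cons y ys =>
      have hylt : ∀ z ∈ ys, y < z := by
        have := pvCdedup_pairwise_lt _ hkpair
        rw [hc] at this
        exact (List.pairwise_cons.mp this).1
      have hyle : ∀ z ∈ s.map (fun a => a.headI), y ≤ z := by
        intro z hz
        have : z ∈ y :: ys := hc ▸ (mem_pvCdedup _ z).mpr hz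
        rcases List.mem_cons.mp this with rfl | h'
        · exact le_refl _
        · exact le_of_lt (hylt _ h')
      simp only [pvGroupby, List.map_cons, pvCdedup, hc, ihp]
      by_cases hk : a.headI = y
      · simp only [if_pos hk, List.map_cons]
        congr 1
        · have : (a :: s).filter (fun b => decide (b.headI = y)) =
              a :: s.filter (fun b => decide (b.headI = y)) := by
            simp [hk]
          rw [this]
        · apply List.map_congr_left
          intro k hkys
          have hne : a.headI ≠ k := by rw [hk]; exact ne_of_lt (hylt k hkys)
          simp [hne]
      · have haley : a.headI ≤ y := by
          have hy : y ∈ s.map (fun a => a.headI) :=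
            (mem_pvCdedup _ y).mp (hc ▸ List.mem_cons_self)
          rcases List.mem_map.mp hy with ⟨b, hb, hbk⟩
          rw [← hbk]; exact hle b hb
        have halt : a.headI < y := lt_of_le_of_ne haley hk
        simp only [if_neg hk, List.map_cons]
        congr 1
        · have hnil : s.filter (fun b => decide (b.headI = a.headI)) = [] := by
            apply List.filter_eq_nil_iff.mpr
            intro b hb
            have hyb : y ≤ b.headI := hyle _ (List.mem_map.mpr ⟨b, hb, rfl⟩)
            simp only [decide_eq_true_eq]
            exact fun hh => absurd hh.symm (ne_of_lt (lt_of_lt_of_le halt hyb))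
          simp [hnil]
        · congr 1
          · have hne : a.headI ≠ y := hk
            simp [hne]
          · apply List.map_congr_left
            intro k hkys
            have hne : a.headI ≠ k := ne_of_lt (lt_trans halt (hylt k hkys))
            simp [hne]

-- the common normal form both ports are reduced to
def pvGroup (articles : List (List Int)) (k : Int) : List (List Int) :=
  articles.filter (fun a => decide (a.headI = k))
def pvTarget (articles : List (List Int)) : List (List Int) :=
  (PySem.List.sorted (PySem.Set.ofList (articles.map (fun a => a.headI))) (fun x => x) false).map
    (fun k => k :: ((pvGroup articles k).length : Int) :: pvCols ((pvGroup articles k).map List.tail))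

theorem pvMin?_perm (l₁ l₂ : List Nat) (h : l₁.Perm l₂) : l₁.min? = l₂.min? := by
  cases hm : l₁.min? with
  | none =>
    rw [List.min?_eq_none_iff] at hm
    subst hm
    rw [List.min?_eq_none_iff.mpr h.symm.eq_nil]
  | some a =>
    rcases List.min?_eq_some_iff.mp hm with ⟨hmem, hle⟩
    symm
    exact List.min?_eq_some_iff.mpr ⟨h.subset hmem, fun b hb => hle b (h.symm.subset hb)⟩

theorem pvCols_perm (ts us : List (List Int)) (h : ts.Perm us) : pvCols ts = pvCols us := by
  unfold pvCols pvMinLen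
  rw [pvMin?_perm _ _ (h.map List.length)]
  apply List.map_congr_left
  intro i _
  exact List.Perm.sum_eq (h.map _)

theorem pvKeys_eq (articles : List (List Int)) :
    PySem.List.sorted (PySem.Set.ofList (articles.map (fun a => a.headI))) (fun x => x) false
      = pvCdedup ((PySem.List.sorted articles (fun v => v.headI) false).map (fun a => a.headI)) := by
  have hpair : ((PySem.List.sorted articles (fun v => v.headI) false).map (fun a => a.headI)).Pairwise (· ≤ ·) :=
    List.pairwise_map.mpr (PySem.List.sorted_pairwise articles (fun v => v.headI))
  apply PySem.List.sorted_eq_of_perm_of_pairwise_lt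
  · have h1 : (pvCdedup ((PySem.List.sorted articles (fun v => v.headI) false).map (fun a => a.headI))).Nodup :=
      (pvCdedup_pairwise_lt _ hpair).imp (fun h => ne_of_lt h)
    have h2 := PySem.Set.nodup_ofList (articles.map (fun a => a.headI))
    apply (List.perm_ext_iff_of_nodup h1 h2).mpr
    intro k
    rw [mem_pvCdedup, PySem.Set.mem_ofList]
    constructor
    · intro hk
      rcases List.mem_map.mp hk with ⟨b, hb, hbk⟩
      exact List.mem_map.mpr ⟨b, (PySem.List.sorted_perm articles (fun v => v.headI) false).subset hb, hbk⟩
    · intro hk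
      rcases List.mem_map.mp hk with ⟨b, hb, hbk⟩
      exact List.mem_map.mpr ⟨b, (PySem.List.sorted_perm articles (fun v => v.headI) false).symm.subset hb, hbk⟩
  · exact pvCdedup_pairwise_lt _ hpair

theorem pvA_eq_target : ∀ articles, count_features articles = pvTarget articles := by
  intro articles
  unfold count_features pvTarget pvGroup
  dsimp only
  have hpair : (PySem.List.sorted articles (fun v => v.headI) false).Pairwise
      (fun a b => a.headI ≤ b.headI) := PySem.List.sorted_pairwise articles (fun v => v.headI)
  rw [pvGroupby_sorted _ hpair, pvKeys_eq articles, List.map_map]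
  apply List.map_congr_left
  intro k hk
  have hperm : ((PySem.List.sorted articles (fun v => v.headI) false).filter
        (fun a => decide (a.headI = k))).Perm
      (articles.filter (fun a => decide (a.headI = k))) :=
    (PySem.List.sorted_perm articles (fun v => v.headI) false).filter _
  simp only [Function.comp_apply, List.map_id']
  rw [List.Perm.length_eq (hperm.map List.tail), pvCols_perm _ _ (hperm.map List.tail)]
  simp

-- the dict after the fold holds, at key k, exactly the tails of k's group (in order)
theorem pvGet?_fold (l : List (List Int)) (d : PySem.Dict Int (List (List Int))) (k : Int) :
    (l.foldl pvStep d).get? k =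
      if (l.filter (fun a => decide (a.headI = k))) = [] then d.get? k
      else some (d.getD k [] ++ (l.filter (fun a => decide (a.headI = k))).map List.tail) := by
  induction l generalizing d with
  | nil => simp
  | cons a l ih =>
    rw [List.foldl_cons, ih, List.filter_cons]
    by_cases hk : a.headI = k
    · have hget : (pvStep d a).get? k = some (d.getD k [] ++ [a.tail]) := by
        unfold pvStep
        rw [PySem.Dict.get?_insert, if_pos hk.symm, hk]
      have hgetD : (pvStep d a).getD k [] = d.getD k [] ++ [a.tail] :=
        PySem.Dict.getD_of_get?_eq_some _ _ hget
      simp only [hk, decide_true, if_true]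
      by_cases h : List.filter (fun a => decide (a.headI = k)) l = []
      · rw [if_pos h, if_neg (by simp), hget, h]
        simp
      · rw [if_neg h, if_neg (by simp), hgetD]
        simp
    · have hget : (pvStep d a).get? k = d.get? k := by
        unfold pvStep
        rw [PySem.Dict.get?_insert, if_neg (fun hh => hk hh.symm)]
      have hgetD : (pvStep d a).getD k [] = d.getD k [] := by
        unfold PySem.Dict.getD
        rw [hget]
      simp only [hk, decide_false, Bool.false_eq_true, if_false]
      by_cases h : List.filter (fun a => decide (a.headI = k)) l = []
      · rw [if_pos h, if_pos h, hget]
      · rw [if_neg h, if_neg h, hgetD]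


theorem pvB_eq_target : ∀ articles, count_features_alt articles = pvTarget articles := by
  intro articles
  unfold count_features_alt pvTarget pvGroup
  dsimp only
  have hstep : pvStep = (fun d (a : List Int) => d.insert a.headI (d.getD a.headI [] ++ [a.tail])) := rfl
  have hkeys : (articles.foldl pvStep PySem.Dict.empty).keys
      = PySem.Set.ofList (articles.map (fun a => a.headI)) := by
    rw [hstep, PySem.Dict.keys_foldl_insert_key articles (fun a => a.headI)
      (fun d a => d.getD a.headI [] ++ [a.tail]) PySem.Dict.empty]
    simp [PySem.Dict.keys_empty, PySem.Set.update, PySem.Set.ofList_eq_foldl]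
  have hnodup : (articles.foldl pvStep PySem.Dict.empty).keys.Nodup := by
    rw [hkeys]; exact PySem.Set.nodup_ofList _
  have hitems : PySem.List.sorted (articles.foldl pvStep PySem.Dict.empty).items (fun p => p.1) false =
      (PySem.List.sorted (articles.foldl pvStep PySem.Dict.empty).keys (fun x => x) false).map
        (fun k => (k, (articles.foldl pvStep PySem.Dict.empty).getD k [])) := by
    apply PySem.List.sorted_eq_of_perm_of_pairwise_lt
    · have h1 := (PySem.List.sorted_perm (articles.foldl pvStep PySem.Dict.empty).keys (fun x => x) false).map
        (fun k => (k, (articles.foldl pvStep PySem.Dict.empty).getD k []))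
      rw [← PySem.Dict.items_eq_map_keys _ hnodup []] at h1
      exact h1
    · rw [List.pairwise_map]
      have hp := PySem.List.sorted_pairwise (articles.foldl pvStep PySem.Dict.empty).keys (fun x => x)
      have hn : (PySem.List.sorted (articles.foldl pvStep PySem.Dict.empty).keys (fun x => x) false).Nodup :=
        ((PySem.List.sorted_perm _ _ false).nodup_iff).mpr hnodup
      exact (hp.and hn).imp (fun h => lt_of_le_of_ne h.1 h.2)
  rw [hitems, List.map_map, hkeys]
  apply List.map_congr_left
  intro k hk
  have hkmem : k ∈ articles.map (fun a => a.headI) := by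
    rw [PySem.List.mem_sorted] at hk
    exact (PySem.Set.mem_ofList _ _).mp hk
  have hfilterne : articles.filter (fun a => decide (a.headI = k)) ≠ [] := by
    rcases List.mem_map.mp hkmem with ⟨b, hb, hbk⟩
    intro hnil
    have : b ∈ articles.filter (fun a => decide (a.headI = k)) :=
      List.mem_filter.mpr ⟨hb, by simp [hbk]⟩
    rw [hnil] at this
    exact absurd this (List.not_mem_nil)
  have hget : (articles.foldl pvStep PySem.Dict.empty).get? k =
      some ((articles.filter (fun a => decide (a.headI = k))).map List.tail) := by
    rw [pvGet?_fold, if_neg hfilterne]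
    simp [PySem.Dict.getD, PySem.Dict.get?_empty]
  have hgetD : (articles.foldl pvStep PySem.Dict.empty).getD k [] =
      (articles.filter (fun a => decide (a.headI = k))).map List.tail :=
    PySem.Dict.getD_of_get?_eq_some _ _ hget
  simp [Function.comp, hgetD]

-- ===== VERDICT (by name: the statement is the Claim_ definition above) =====
theorem count_features_spec : Claim_equal_count_features := by
  intro articles _ _
  unfold Spec_count_features
  rw [pvA_eq_target, pvB_eq_target]
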